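-- pv_equiv track=rewrite | github.com/Palpatraz02/ISITILPassistant | Funzioni.py | rimuovi_spazzi_non_necessari
-- ===== SOURCE A (Python) =====
-- def rimuovi_spazzi_non_necessari(stringa):
--     temp = ""
--     space = False
--     for x in stringa:
--         if x == " " and space == True:
--             continue
--         elif x == " " and space == False:
--             space = True
--         else:
--             space = False
--         temp = temp + x
--     if stringa[0] == " ":
--         temp = temp[1:]
--     if stringa[-1] == " ":
--         temp = temp[:-1]
--     return temp.lower()
-- ===== SOURCE B (Python) =====
-- def rimuovi_spazzi_non_necessari(stringa):
--     pezzi = [p for p in stringa.split(" ") if p]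
--     return " ".join(pezzi).lower()
-- ===== Notes on version B (the rewrite author's own statement) =====
-- stated objective: idiomatic
-- what changed: Replaces the character-by-character state-machine loop with quadratic repeated string concatenation and manual edge-slice trimming by the idiomatic split-on-space / filter empties / join-with-one-space pipeline, then lower().
import Mathlib
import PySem

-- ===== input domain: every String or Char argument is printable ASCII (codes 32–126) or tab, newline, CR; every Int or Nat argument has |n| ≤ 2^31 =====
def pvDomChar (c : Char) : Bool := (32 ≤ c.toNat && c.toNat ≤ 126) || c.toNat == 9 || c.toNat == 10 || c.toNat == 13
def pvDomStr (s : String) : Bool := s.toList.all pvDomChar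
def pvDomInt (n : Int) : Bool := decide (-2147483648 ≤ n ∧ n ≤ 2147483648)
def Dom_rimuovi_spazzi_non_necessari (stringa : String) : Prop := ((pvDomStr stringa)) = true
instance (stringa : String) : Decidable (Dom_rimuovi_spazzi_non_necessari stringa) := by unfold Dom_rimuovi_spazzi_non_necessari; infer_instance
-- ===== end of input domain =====

-- B replaces A's stateful collapsing loop with manual edge trimming by the idiomatic split/filter/join pipeline; equal on nonempty strings (A raises IndexError on "").

-- ===== PORT A =====
def rimuovi_spazzi_non_necessari (stringa : String) : String :=
  let cs := stringa.toList
  let r := cs.foldl (fun (st : List Char × Bool) x =>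
      if x = ' ' ∧ st.2 = true then st
      else if x = ' ' ∧ st.2 = false then (st.1 ++ [x], true)
      else (st.1 ++ [x], false)) ([], false)
  let temp := r.1
  let temp1 := if PySem.List.pyGet? cs 0 = some ' ' then PySem.List.slice temp (some 1) none else temp
  let temp2 := if PySem.List.pyGet? cs (-1) = some ' ' then PySem.List.slice temp1 none (some (-1)) else temp1
  String.ofList (PySem.Chars.lower temp2)

-- ===== PORT B =====
def rimuovi_spazzi_non_necessari_alt (stringa : String) : String :=
  let pezzi := (PySem.Chars.splitOn stringa.toList [' ']).filter (fun p => !p.isEmpty)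
  String.ofList (PySem.Chars.lower (PySem.Chars.join [' '] pezzi))

-- ===== PRECONDITION & SPEC =====
-- Pre_ excludes only the empty string, on which A raises IndexError (stringa[0]).
def Pre_rimuovi_spazzi_non_necessari (stringa : String) : Prop := stringa ≠ ""
instance (stringa : String) : Decidable (Pre_rimuovi_spazzi_non_necessari stringa) := by unfold Pre_rimuovi_spazzi_non_necessari; infer_instance
def pvWitness_rimuovi_spazzi_non_necessari : String := " Ciao  Mondo "

def Spec_rimuovi_spazzi_non_necessari (stringa : String) (out : String) : Prop := out = rimuovi_spazzi_non_necessari_alt stringa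
instance (stringa : String) (out : String) : Decidable (Spec_rimuovi_spazzi_non_necessari stringa out) := by unfold Spec_rimuovi_spazzi_non_necessari; infer_instance

-- ===== CLAIM (what is proved, stated in full; the proofs are below) =====
def Claim_equal_rimuovi_spazzi_non_necessari : Prop := ∀ (stringa : String), Dom_rimuovi_spazzi_non_necessari stringa → Pre_rimuovi_spazzi_non_necessari stringa → Spec_rimuovi_spazzi_non_necessari stringa (rimuovi_spazzi_non_necessari stringa)

-- ===== LEMMAS AND PROOFS =====

/-- A's collapsing loop, as a structural recursion. -/
def pvCollapse : List Char → Bool → List Char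
  | [], _ => []
  | c :: rest, sp =>
    if c = ' ' ∧ sp = true then pvCollapse rest true
    else c :: pvCollapse rest (decide (c = ' '))

/-- Python's str.split(" "), as a structural recursion. -/
def pvSplit : List Char → List (List Char)
  | [] => [[]]
  | c :: rest => if c = ' ' then [] :: pvSplit rest else (pvSplit rest).modifyHead (c :: ·)

/-- Reconstruction of pvCollapse's output from the split pieces. -/
def pvSquash : Bool → List (List Char) → List Char
  | _, [] => []
  | _, [p] => p
  | sp, p :: ps => p ++ (if p = [] ∧ sp = true then [] else [' ']) ++ pvSquash true ps

theorem pvSplit_ne_nil (cs : List Char) : pvSplit cs ≠ [] := by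
  induction cs with
  | nil => simp [pvSplit]
  | cons c rest ih =>
    simp only [pvSplit]
    split
    · simp
    · cases h : pvSplit rest with
      | nil => exact absurd h ih
      | cons p ps => simp

theorem pvSquash_cons (sp : Bool) (p : List Char) (ps : List (List Char)) (h : ps ≠ []) :
    pvSquash sp (p :: ps) = p ++ (if p = [] ∧ sp = true then [] else [' ']) ++ pvSquash true ps := by
  cases ps with
  | nil => exact absurd rfl h
  | cons q t => rfl

theorem pvSquash_nil_cons (ps : List (List Char)) (h : ps ≠ []) :
    pvSquash true ([] :: ps) = pvSquash true ps := by
  rw [pvSquash_cons true [] ps h]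
  simp

theorem pvSquash_false_head (sp : Bool) (p : List Char) (ps : List (List Char)) (hp : p ≠ []) :
    pvSquash sp (p :: ps) = pvSquash true (p :: ps) := by
  cases ps with
  | nil => rfl
  | cons q t =>
    rw [pvSquash_cons sp p (q :: t) (by simp), pvSquash_cons true p (q :: t) (by simp)]
    simp [hp]

theorem pvFoldl_collapse (cs : List Char) (temp : List Char) (sp : Bool) :
    (cs.foldl (fun (st : List Char × Bool) x =>
      if x = ' ' ∧ st.2 = true then st
      else if x = ' ' ∧ st.2 = false then (st.1 ++ [x], true)
      else (st.1 ++ [x], false)) (temp, sp)).1 = temp ++ pvCollapse cs sp := by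
  induction cs generalizing temp sp with
  | nil => simp [pvCollapse]
  | cons c rest ih =>
    simp only [List.foldl_cons, pvCollapse]
    by_cases h : c = ' ' ∧ sp = true
    · simp [h, ih]
    · by_cases h2 : c = ' '
      · have hsp : sp = false := by
          cases sp
          · rfl
          · exact absurd ⟨h2, rfl⟩ h
        subst hsp
        simp [h2, ih]
      · simp [h2, ih]

theorem pvGo_spec (fuel : Nat) : ∀ (l cur : List Char) (acc : List (List Char)), l.length ≤ fuel →
    PySem.Chars.splitOn.go [' '] fuel l cur acc
      = acc.reverse ++ (pvSplit l).modifyHead (cur.reverse ++ ·) := by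
  induction fuel with
  | zero =>
    intro l cur acc hl
    have : l = [] := by
      cases l with
      | nil => rfl
      | cons c t => simp at hl
    subst this
    rw [PySem.Chars.splitOn.go]
    simp [pvSplit]
  | succ f ih =>
    intro l cur acc hl
    cases l with
    | nil =>
      rw [PySem.Chars.splitOn.go]
      simp [pvSplit]
      omega
    | cons c rest =>
      rw [PySem.Chars.splitOn.go]
      by_cases hc : c = ' '
      · subst hc
        have hpre : [' '].isPrefixOf (' ' :: rest) = true := by simp [List.isPrefixOf]
        rw [if_pos hpre]
        simp only [List.length_singleton, List.drop_one, List.tail_cons]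
        simp only [List.length_cons] at hl
        rw [ih rest [] (cur.reverse :: acc) (by omega)]
        simp [pvSplit]
        cases h : pvSplit rest with
        | nil => exact absurd h (pvSplit_ne_nil rest)
        | cons p ps => simp
      · have hpre : [' '].isPrefixOf (c :: rest) = false := by
          simp [List.isPrefixOf]
          intro h; exact absurd h.symm hc
        rw [if_neg (by simp [hpre])]
        simp only [List.length_cons] at hl
        rw [ih rest (c :: cur) acc (by omega)]
        simp only [pvSplit, if_neg hc]
        cases h : pvSplit rest with
        | nil => exact absurd h (pvSplit_ne_nil rest)
        | cons p ps => simp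

theorem pvSplitOn_eq (cs : List Char) : PySem.Chars.splitOn cs [' '] = pvSplit cs := by
  show PySem.Chars.splitOn.go [' '] (cs.length + 1) cs [] [] = pvSplit cs
  rw [pvGo_spec (cs.length + 1) cs [] [] (by omega)]
  cases h : pvSplit cs with
  | nil => exact absurd h (pvSplit_ne_nil cs)
  | cons p ps => simp

theorem pvCollapse_eq_squash (cs : List Char) (sp : Bool) :
    pvCollapse cs sp = pvSquash sp (pvSplit cs) := by
  induction cs generalizing sp with
  | nil => cases sp <;> rfl
  | cons c rest ih =>
    by_cases hc : c = ' '
    · subst hc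
      simp only [pvSplit, if_true]
      rw [pvSquash_cons sp [] (pvSplit rest) (pvSplit_ne_nil rest)]
      cases sp with
      | true => simp [pvCollapse, ih]
      | false => simp [pvCollapse, ih]
    · simp only [pvSplit, if_neg hc, pvCollapse]
      rw [if_neg (by simp [hc])]
      cases h : pvSplit rest with
      | nil => exact absurd h (pvSplit_ne_nil rest)
      | cons p ps =>
        cases ps with
        | nil =>
          have := ih (sp := false)
          rw [h] at this
          simp only [List.modifyHead]
          simp [pvSquash, hc, this]
        | cons q t =>
          have := ih (sp := false)
          rw [h] at this
          rw [pvSquash_cons false p (q :: t) (by simp)] at this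
          simp only [List.modifyHead]
          rw [pvSquash_cons sp (c :: p) (q :: t) (by simp)]
          simp [hc, this]

theorem pvSquash_true_eq_nil_iff (ps : List (List Char)) :
    pvSquash true ps = [] ↔ ps.filter (fun p => !p.isEmpty) = [] := by
  induction ps with
  | nil => simp [pvSquash]
  | cons p ps ih =>
    cases ps with
    | nil =>
      cases p with
      | nil => simp [pvSquash]
      | cons x xs => simp [pvSquash]
    | cons q t =>
      rw [pvSquash_cons true p (q :: t) (by simp)]
      cases p with
      | nil => simpa using ih
      | cons x xs => simp [List.filter]

theorem pvFilter_ne_nil_of_getLast (ps : List (List Char)) (h : ps ≠ [])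
    (hl : ps.getLast? ≠ some []) : ps.filter (fun p => !p.isEmpty) ≠ [] := by
  obtain ⟨x, hx⟩ := Option.isSome_iff_exists.mp (List.getLast?_isSome.mpr h)
  have hxmem : x ∈ ps := List.mem_of_getLast? hx
  have hxne : x ≠ [] := by
    intro hcon; subst hcon; exact hl hx
  intro hfil
  have : x ∈ ps.filter (fun p => !p.isEmpty) := by
    rw [List.mem_filter]
    exact ⟨hxmem, by simp [hxne]⟩
  rw [hfil] at this
  simp at this

theorem pvIntercalate_cons_cons (p q : List Char) (t : List (List Char)) :
    List.intercalate [' '] (p :: q :: t) = p ++ [' '] ++ List.intercalate [' '] (q :: t) := by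
  simp [List.intercalate, List.intersperse]

theorem pvIntercalate_cons_ne (p : List Char) (l : List (List Char)) (hl : l ≠ []) :
    List.intercalate [' '] (p :: l) = p ++ [' '] ++ List.intercalate [' '] l := by
  cases l with
  | nil => exact absurd rfl hl
  | cons q t => exact pvIntercalate_cons_cons p q t

theorem pvTrim_squash (ps : List (List Char)) (h : ps ≠ []) :
    (if ps.getLast? = some [] then (pvSquash true ps).dropLast else pvSquash true ps)
      = List.intercalate [' '] (ps.filter (fun p => !p.isEmpty)) := by
  induction ps with
  | nil => exact absurd rfl h
  | cons p ps ih =>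
    cases ps with
    | nil =>
      cases p with
      | nil => simp [pvSquash, List.intercalate]
      | cons x xs => simp [pvSquash, List.intercalate]
    | cons q t =>
      have hqt : (q :: t) ≠ [] := by simp
      rw [pvSquash_cons true p (q :: t) hqt]
      have hglast : ((p :: q :: t) : List (List Char)).getLast? = (q :: t).getLast? := by
        simp [List.getLast?_cons_cons]
      rw [hglast]
      cases p with
      | nil =>
        simpa using ih hqt
      | cons x xs =>
        have hfil : List.filter (fun p => !p.isEmpty) ((x :: xs) :: q :: t)
            = (x :: xs) :: List.filter (fun p => !p.isEmpty) (q :: t) := by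
          simp [List.filter]
        rw [hfil]
        rw [if_neg (by simp : ¬((x :: xs) = [] ∧ true = true))]
        by_cases hL : (q :: t).getLast? = some []
        · rw [if_pos hL]
          rw [if_pos hL] at ih
          cases hs : pvSquash true (q :: t) with
          | nil =>
            have hfe : List.filter (fun p => !p.isEmpty) (q :: t) = [] :=
              (pvSquash_true_eq_nil_iff (q :: t)).mp hs
            rw [hfe]
            rw [show (x :: xs) ++ [' '] ++ ([] : List Char) = (x :: xs) ++ [' '] by simp]
            rw [List.dropLast_concat]
            simp [List.intercalate, List.intersperse]
          | cons y ys =>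
            have hfe : List.filter (fun p => !p.isEmpty) (q :: t) ≠ [] := by
              intro hcon
              have := (pvSquash_true_eq_nil_iff (q :: t)).mpr hcon
              rw [hs] at this; simp at this
            rw [← hs]
            rw [List.dropLast_append_of_ne_nil (by simp [hs] : pvSquash true (q :: t) ≠ [])]
            rw [ih hqt]
            rw [pvIntercalate_cons_ne _ _ hfe]
        · rw [if_neg hL]
          rw [if_neg hL] at ih
          have hfe := pvFilter_ne_nil_of_getLast (q :: t) hqt hL
          rw [ih hqt]
          rw [pvIntercalate_cons_ne _ _ hfe]

theorem pvModifyHead_append_left {α : Type} (f : α → α) (l m : List α) (h : l ≠ []) :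
    (l ++ m).modifyHead f = l.modifyHead f ++ m := by
  cases l with
  | nil => exact absurd rfl h
  | cons x xs => rfl

theorem pvGetLast?_cons_of_ne_nil {α : Type} (a : α) (l : List α) (h : l ≠ []) :
    (a :: l).getLast? = l.getLast? := by
  cases l with
  | nil => exact absurd rfl h
  | cons b m => exact List.getLast?_cons_cons

theorem pvSplit_concat_space (xs : List Char) : pvSplit (xs ++ [' ']) = pvSplit xs ++ [[]] := by
  induction xs with
  | nil => rfl
  | cons c rest ih =>
    by_cases hc : c = ' '
    · subst hc
      simp [pvSplit, ih]
    · simp only [List.cons_append, pvSplit, if_neg hc, ih]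
      rw [pvModifyHead_append_left _ _ _ (pvSplit_ne_nil rest)]

theorem pvSplit_concat_nonspace (xs : List Char) (c : Char) (hc : c ≠ ' ') :
    ∃ t, (pvSplit (xs ++ [c])).getLast? = some (t ++ [c]) := by
  induction xs with
  | nil =>
    refine ⟨[], ?_⟩
    simp [pvSplit, if_neg hc]
  | cons x rest ih =>
    obtain ⟨t, ht⟩ := ih
    by_cases hx : x = ' '
    · subst hx
      refine ⟨t, ?_⟩
      simp only [List.cons_append, pvSplit, if_true]
      rw [pvGetLast?_cons_of_ne_nil _ _ (pvSplit_ne_nil _)]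
      exact ht
    · simp only [List.cons_append, pvSplit, if_neg hx]
      cases h : pvSplit (rest ++ [c]) with
      | nil => exact absurd h (pvSplit_ne_nil _)
      | cons p ps =>
        rw [h] at ht
        cases ps with
        | nil =>
          simp only [List.getLast?_singleton, Option.some_inj] at ht
          refine ⟨x :: t, ?_⟩
          simp [List.modifyHead, ht]
        | cons q u =>
          refine ⟨t, ?_⟩
          simp only [List.modifyHead]
          rw [List.getLast?_cons_cons]
          rw [List.getLast?_cons_cons] at ht
          exact ht

theorem pvLast_iff (cs : List Char) (h : cs ≠ []) :
    cs.getLast? = some ' ' ↔ (pvSplit cs).getLast? = some [] := by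
  rcases List.eq_nil_or_concat cs with rfl | ⟨ys, c, rfl⟩
  · exact absurd rfl h
  · rw [List.concat_eq_append]
    by_cases hc : c = ' '
    · subst hc
      rw [pvSplit_concat_space]
      simp
    · obtain ⟨t, ht⟩ := pvSplit_concat_nonspace ys c hc
      rw [ht]
      simp [hc]

theorem pvMain (cs : List Char) (h : cs ≠ []) :
    (if PySem.List.pyGet? cs (-1) = some ' '
       then PySem.List.slice (if PySem.List.pyGet? cs 0 = some ' '
               then PySem.List.slice (cs.foldl (fun (st : List Char × Bool) x =>
                      if x = ' ' ∧ st.2 = true then st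
                      else if x = ' ' ∧ st.2 = false then (st.1 ++ [x], true)
                      else (st.1 ++ [x], false)) ([], false)).1 (some 1) none
               else (cs.foldl (fun (st : List Char × Bool) x =>
                      if x = ' ' ∧ st.2 = true then st
                      else if x = ' ' ∧ st.2 = false then (st.1 ++ [x], true)
                      else (st.1 ++ [x], false)) ([], false)).1) none (some (-1))
       else (if PySem.List.pyGet? cs 0 = some ' '
               then PySem.List.slice (cs.foldl (fun (st : List Char × Bool) x =>
                      if x = ' ' ∧ st.2 = true then st
                      else if x = ' ' ∧ st.2 = false then (st.1 ++ [x], true)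
                      else (st.1 ++ [x], false)) ([], false)).1 (some 1) none
               else (cs.foldl (fun (st : List Char × Bool) x =>
                      if x = ' ' ∧ st.2 = true then st
                      else if x = ' ' ∧ st.2 = false then (st.1 ++ [x], true)
                      else (st.1 ++ [x], false)) ([], false)).1))
    = PySem.Chars.join [' '] ((PySem.Chars.splitOn cs [' ']).filter (fun p => !p.isEmpty)) := by
  rw [pvFoldl_collapse cs [] false]
  simp only [List.nil_append]
  rw [pvSplitOn_eq]
  rw [PySem.List.slice_from_one, PySem.List.slice_to_neg_one, PySem.List.pyGet?_neg_one]
  show (if cs.getLast? = some ' ' then _ else _) = PySem.Chars.join [' '] _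
  have hinner : (if PySem.List.pyGet? cs 0 = some ' '
      then (pvCollapse cs false).tail else pvCollapse cs false) = pvSquash true (pvSplit cs) := by
    cases cs with
    | nil => exact absurd rfl h
    | cons c rest =>
      by_cases hc : c = ' '
      · subst hc
        rw [if_pos (by simp)]
        have hcoll : pvCollapse (' ' :: rest) false = ' ' :: pvCollapse rest true := by
          simp [pvCollapse]
        rw [hcoll]
        simp only [List.tail_cons]
        rw [pvCollapse_eq_squash]
        rw [show pvSplit (' ' :: rest) = [] :: pvSplit rest by simp [pvSplit]]
        rw [pvSquash_nil_cons (pvSplit rest) (pvSplit_ne_nil rest)]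
      · rw [if_neg (by simp [hc])]
        rw [pvCollapse_eq_squash]
        rw [show pvSplit (c :: rest) = (pvSplit rest).modifyHead (c :: ·) by simp [pvSplit, hc]]
        cases hsp : pvSplit rest with
        | nil => exact absurd hsp (pvSplit_ne_nil rest)
        | cons p ps =>
          simp only [List.modifyHead]
          exact pvSquash_false_head false (c :: p) ps (by simp)
  rw [hinner]
  rw [if_congr (pvLast_iff cs h) rfl rfl]
  rw [pvTrim_squash (pvSplit cs) (pvSplit_ne_nil cs)]
  rfl

-- ===== VERDICT (by name: the statement is the Claim_ definition above) =====
theorem rimuovi_spazzi_non_necessari_spec : Claim_equal_rimuovi_spazzi_non_necessari := by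
  intro s _ hpre
  have hne : s.toList ≠ [] := by
    intro hc
    exact hpre (String.toList_inj.mp (by simp [hc]))
  unfold Spec_rimuovi_spazzi_non_necessari rimuovi_spazzi_non_necessari rimuovi_spazzi_non_necessari_alt
  exact congrArg (fun l => String.ofList (PySem.Chars.lower l)) (pvMain s.toList hne)
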